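-- pv_equiv track=rewrite | github.com/madman1397/AdventOfCode | Max/2022/AOC2022_8.py | check_trees_blocked
-- ===== SOURCE A (Python) =====
-- def check_trees_blocked(idx_row, idx_col, tree_list):
--     idx_row = int(idx_row)
--     idx_col = int(idx_col)
--
--     blocked_status = [False, False, False, False]
--
--     # check left
--     for idx in range(idx_col-1, -1, -1):
--         if tree_list[idx_row][idx_col] <= tree_list[idx_row][idx]:
--             blocked_status[0] = True
--             break
--
--     # check right
--     for idx in range(idx_col+1, len(tree_list[idx_row])):
--         if tree_list[idx_row][idx_col] <= tree_list[idx_row][idx]: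
--             blocked_status[1] = True
--             break
--
--     # check above
--     for idx in range(idx_row-1, -1, -1):
--         if tree_list[idx_row][idx_col] <= tree_list[idx][idx_col]:
--             blocked_status[2] = True
--             break
--
--     # check below
--     for idx in range(idx_row+1, len(tree_list)):
--         if tree_list[idx_row][idx_col] <= tree_list[idx][idx_col]:
--             blocked_status[3] = True
--             break
--
--     return (blocked_status[0] and blocked_status[1] and blocked_status[2] and blocked_status[3])
-- ===== SOURCE B (Python) =====
-- def check_trees_blocked(idx_row, idx_col, tree_list):
--     idx_row = int(idx_row)
--     idx_col = int(idx_col)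
--     row = tree_list[idx_row]
--     h = row[idx_col]
--
--     def side_maxes(seq, k):
--         # one pass: the tallest tree strictly before position k and strictly after it
--         before = after = None
--         for i, t in enumerate(seq):
--             if i < k:
--                 if before is None or before < t:
--                     before = t
--             elif k < i:
--                 if after is None or after < t:
--                     after = t
--         return before, after
--
--     left, right = side_maxes(row, idx_col)
--     up, down = side_maxes([r[idx_col] for r in tree_list], idx_row)
--
--     def blocked(m):
--         return m is not None and h <= m
--
--     return blocked(left) and blocked(right) and blocked(up) and blocked(down)
-- ===== Notes on version B (the rewrite author's own statement) =====
-- stated objective: alternative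
-- what changed: Instead of A's four directional early-exit scans that set boolean flags, B makes one accumulator pass over the row and one over the column, each computing the running maxima of the trees on both sides of the target simultaneously, and finally compares the height against the four maxima.
-- outside the precondition, e.g. on check_trees_blocked(0, 1, [[5, 9], [3, 9], [7]]): A returns False, B raises IndexError
import Mathlib
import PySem

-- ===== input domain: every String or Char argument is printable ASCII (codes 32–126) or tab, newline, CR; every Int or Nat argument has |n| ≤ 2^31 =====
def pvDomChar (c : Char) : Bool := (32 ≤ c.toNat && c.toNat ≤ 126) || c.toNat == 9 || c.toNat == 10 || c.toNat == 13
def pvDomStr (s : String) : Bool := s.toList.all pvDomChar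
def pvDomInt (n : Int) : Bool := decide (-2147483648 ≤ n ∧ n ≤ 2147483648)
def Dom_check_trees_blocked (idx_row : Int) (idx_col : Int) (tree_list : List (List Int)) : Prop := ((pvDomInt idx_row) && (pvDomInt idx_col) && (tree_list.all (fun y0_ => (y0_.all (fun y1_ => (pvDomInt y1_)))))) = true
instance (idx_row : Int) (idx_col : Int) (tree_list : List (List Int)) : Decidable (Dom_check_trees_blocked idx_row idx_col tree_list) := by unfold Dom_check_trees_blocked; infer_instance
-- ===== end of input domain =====

-- B replaces A's four directional early-exit flag loops by one accumulator pass over the row and one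
-- over the column, each computing the running maxima on both sides of the target at once, then
-- compares the height against the four maxima (same asymptotic cost, different pass structure).


-- ===== PORT A =====
def check_trees_blocked (idx_row : Int) (idx_col : Int) (tree_list : List (List Int)) : Bool :=
  let row := PySem.List.pyGetD tree_list idx_row []
  let h := PySem.List.pyGetD row idx_col 0
  -- check left (set-flag-and-break over the countdown range = any; exact under Pre_, where no read raises)
  let b0 := (PySem.List.pyRange (idx_col - 1) (-1) (-1)).any (fun idx => decide (h ≤ PySem.List.pyGetD row idx 0))
  -- check right
  let b1 := (PySem.List.pyRange (idx_col + 1) (row.length : Int) 1).any (fun idx => decide (h ≤ PySem.List.pyGetD row idx 0))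
  -- check above
  let b2 := (PySem.List.pyRange (idx_row - 1) (-1) (-1)).any (fun idx => decide (h ≤ PySem.List.pyGetD (PySem.List.pyGetD tree_list idx []) idx_col 0))
  -- check below
  let b3 := (PySem.List.pyRange (idx_row + 1) (tree_list.length : Int) 1).any (fun idx => decide (h ≤ PySem.List.pyGetD (PySem.List.pyGetD tree_list idx []) idx_col 0))
  b0 && b1 && b2 && b3

-- ===== PORT B =====
-- `if m is None or m < t: m = t` — one step of the running maximum (None = no tree seen yet)
def pvOmaxStep (acc : Option Int) (t : Int) : Option Int :=
  if acc.elim true (fun b => decide (b < t)) then some t else acc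

-- B's single pass over seq: running maxima of the trees strictly before / strictly after position k
def pvSideMaxes (seq : List Int) (k : Int) : Option Int × Option Int :=
  (PySem.List.enumerate seq 0).foldl
    (fun bm p =>
      if p.1 < k then (pvOmaxStep bm.1 p.2, bm.2)
      else if k < p.1 then (bm.1, pvOmaxStep bm.2 p.2)
      else bm)
    (none, none)

def check_trees_blocked_alt (idx_row : Int) (idx_col : Int) (tree_list : List (List Int)) : Bool :=
  let row := PySem.List.pyGetD tree_list idx_row []
  let h := PySem.List.pyGetD row idx_col 0
  let lr := pvSideMaxes row idx_col
  let ud := pvSideMaxes (tree_list.map (fun r => PySem.List.pyGetD r idx_col 0)) idx_row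
  let blocked := fun (m : Option Int) => m.elim false (fun x => decide (h ≤ x))
  blocked lr.1 && blocked lr.2 && blocked ud.1 && blocked ud.2

-- ===== PRECONDITION & SPEC =====
-- Pre_ excludes exactly the inputs on which a program raises IndexError: it requires idx_row and
-- idx_col to be valid (possibly negative) Python indices into the grid and into EVERY row, because
-- A's vertical scans index arbitrary rows and B builds the whole column; on grids with a row too
-- short for idx_col A can still return (a scan breaking early) while B raises — see claim.json cites.
def Pre_check_trees_blocked (idx_row : Int) (idx_col : Int) (tree_list : List (List Int)) : Prop :=
  (∀ r ∈ tree_list, -(r.length : Int) ≤ idx_col ∧ idx_col < (r.length : Int)) ∧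
  (-(tree_list.length : Int) ≤ idx_row ∧ idx_row < (tree_list.length : Int))
instance (idx_row : Int) (idx_col : Int) (tree_list : List (List Int)) : Decidable (Pre_check_trees_blocked idx_row idx_col tree_list) := by unfold Pre_check_trees_blocked; infer_instance

def pvWitness_check_trees_blocked : Int × Int × List (List Int) :=
  (1, 1, [[3, 5, 3], [2, 1, 4], [6, 2, 2]])

def Spec_check_trees_blocked (idx_row : Int) (idx_col : Int) (tree_list : List (List Int)) (out : Bool) : Prop := out = check_trees_blocked_alt idx_row idx_col tree_list
instance (idx_row : Int) (idx_col : Int) (tree_list : List (List Int)) (out : Bool) : Decidable (Spec_check_trees_blocked idx_row idx_col tree_list out) := by unfold Spec_check_trees_blocked; infer_instance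

-- ===== CLAIM (what is proved, stated in full; the proofs are below) =====
def Claim_equal_check_trees_blocked : Prop := ∀ (idx_row : Int) (idx_col : Int) (tree_list : List (List Int)), Dom_check_trees_blocked idx_row idx_col tree_list → Pre_check_trees_blocked idx_row idx_col tree_list → Spec_check_trees_blocked idx_row idx_col tree_list (check_trees_blocked idx_row idx_col tree_list)

-- ===== LEMMAS AND PROOFS =====

-- the comparison against a running maximum equals the existence check over the list it folded
lemma elim_foldl_omax (h : Int) (xs : List Int) (acc : Option Int) :
    ((xs.foldl pvOmaxStep acc).elim false (fun x => decide (h ≤ x)))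
      = (acc.elim false (fun x => decide (h ≤ x)) || xs.any (fun t => decide (h ≤ t))) := by
  induction xs generalizing acc with
  | nil => simp
  | cons t xs ih =>
      rw [List.foldl_cons, ih]
      cases acc with
      | none => simp [pvOmaxStep]
      | some b =>
          by_cases hb : b < t
          · have hd : (decide (h ≤ b) || decide (h ≤ t)) = decide (h ≤ t) := by
              by_cases hh : h ≤ b <;> simp [hh]; omega
            simp [pvOmaxStep, hb, ← Bool.or_assoc, hd]
          · have hd : (decide (h ≤ b) || decide (h ≤ t)) = decide (h ≤ b) := by
              by_cases hh : h ≤ t <;> simp [hh]; omega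
            simp [pvOmaxStep, hb, ← Bool.or_assoc, hd]

-- B's fold splits into the two independent running-maximum folds over the two index buckets
lemma foldl_split_buckets (k : Int) (l : List (Int × Int)) (b a : Option Int) :
    (l.foldl
      (fun bm p =>
        if p.1 < k then (pvOmaxStep bm.1 p.2, bm.2)
        else if k < p.1 then (bm.1, pvOmaxStep bm.2 p.2)
        else bm)
      (b, a))
      = (((l.filter (fun p => decide (p.1 < k))).map (·.2)).foldl pvOmaxStep b,
         ((l.filter (fun p => decide (k < p.1))).map (·.2)).foldl pvOmaxStep a) := by
  induction l generalizing b a with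
  | nil => simp
  | cons p l ih =>
      rcases lt_trichotomy p.1 k with hlt | heq | hgt
      · simp [List.foldl_cons, hlt, not_lt.mpr (le_of_lt hlt), ih]
      · simp [List.foldl_cons, heq, ih]
      · simp [List.foldl_cons, hgt, not_lt.mpr (le_of_lt hgt), ih]

-- the before-bucket of enumerate is a prefix of the list
lemma bucket_before (xs : List Int) (s k : Int) :
    ((PySem.List.enumerate xs s).filter (fun p => decide (p.1 < k))).map (·.2)
      = xs.take (k - s).toNat := by
  induction xs generalizing s with
  | nil => simp [PySem.List.enumerate_nil]
  | cons t xs ih =>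
      rw [PySem.List.enumerate_cons]
      by_cases hs : s < k
      · have h1 : (k - s).toNat = (k - (s + 1)).toNat + 1 := by omega
        simp [hs, ih, h1]
      · have h1 : (k - s).toNat = 0 := by omega
        have h2 : (k - (s + 1)).toNat = 0 := by omega
        simp [hs, ih, h1, h2]

-- the after-bucket of enumerate is a suffix of the list
lemma bucket_after (xs : List Int) (s k : Int) :
    ((PySem.List.enumerate xs s).filter (fun p => decide (k < p.1))).map (·.2)
      = xs.drop (k + 1 - s).toNat := by
  induction xs generalizing s with
  | nil => simp [PySem.List.enumerate_nil]
  | cons t xs ih =>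
      rw [PySem.List.enumerate_cons]
      by_cases hs : k < s
      · have h1 : (k + 1 - s).toNat = 0 := by omega
        have h2 : (k + 1 - (s + 1)).toNat = 0 := by omega
        have h3 : (k - s).toNat = 0 := by omega
        simp [hs, ih, h1, h3]
      · have h1 : (k + 1 - s).toNat = (k + 1 - (s + 1)).toNat + 1 := by omega
        simp [hs, ih, h1]

-- characterisation of B's pass: the two sides are the running maxima of take/drop
lemma sideMaxes_eq (seq : List Int) (k : Int) :
    pvSideMaxes seq k
      = ((seq.take k.toNat).foldl pvOmaxStep none,
         (seq.drop (k + 1).toNat).foldl pvOmaxStep none) := by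
  unfold pvSideMaxes
  rw [foldl_split_buckets, bucket_before, bucket_after]
  norm_num

-- A's leftward/upward countdown loop `for idx in range(c-1,-1,-1)` tests the elements of xs[:c]
lemma any_countdown_eq_any_take (xs : List Int) (hh : Int) (c : Nat) (hc : c ≤ xs.length) :
    ((PySem.List.pyRange ((c : Int) - 1) (-1) (-1)).any (fun idx => decide (hh ≤ PySem.List.pyGetD xs idx 0)))
      = ((xs.take c).any (fun t => decide (hh ≤ t))) := by
  rw [PySem.List.pyRange_neg_one, Bool.eq_iff_iff]
  simp only [List.any_map, List.any_eq_true, Function.comp, List.mem_range, decide_eq_true_eq]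
  constructor
  · rintro ⟨k, hk, hle⟩
    have hk' : k < c := by omega
    have hi : c - 1 - k < (xs.take c).length := by simp [List.length_take]; omega
    refine ⟨(xs.take c)[c - 1 - k]'hi, List.getElem_mem hi, ?_⟩
    rw [PySem.List.pyGetD_eq_getElem xs 0 (by omega) (by omega)] at hle
    have he : ((c : Int) - 1 - (k : Int)).toNat = c - 1 - k := by omega
    simpa [List.getElem_take, he] using hle
  · rintro ⟨t, hmem, hle⟩
    obtain ⟨i, hi, rfl⟩ := List.mem_iff_getElem.mp hmem
    have hi' : i < c := by simp [List.length_take] at hi; omega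
    refine ⟨c - 1 - i, by omega, ?_⟩
    rw [PySem.List.pyGetD_eq_getElem xs 0 (by omega) (by omega)]
    have he : ((c : Int) - 1 - ((c - 1 - i : Nat) : Int)).toNat = i := by omega
    simpa [he, List.getElem_take] using hle

-- A's rightward/downward loop `for idx in range(c+1, len(xs))` tests the elements of xs[c+1:]
lemma any_countup_eq_any_drop (xs : List Int) (hh : Int) (c : Nat) :
    ((PySem.List.pyRange ((c : Int) + 1) (xs.length : Int) 1).any (fun idx => decide (hh ≤ PySem.List.pyGetD xs idx 0)))
      = ((xs.drop (c + 1)).any (fun t => decide (hh ≤ t))) := by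
  rw [Bool.eq_iff_iff]
  simp only [List.any_eq_true, PySem.List.mem_pyRange_one, decide_eq_true_eq]
  constructor
  · rintro ⟨idx, ⟨hlo, hhi⟩, hle⟩
    have hj : idx.toNat - (c + 1) < (xs.drop (c + 1)).length := by simp [List.length_drop]; omega
    refine ⟨(xs.drop (c + 1))[idx.toNat - (c + 1)]'hj, List.getElem_mem hj, ?_⟩
    rw [PySem.List.pyGetD_eq_getElem xs 0 (by omega) (by omega)] at hle
    have he : c + 1 + (idx.toNat - (c + 1)) = idx.toNat := by omega
    simpa [List.getElem_drop, he] using hle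
  · rintro ⟨t, hmem, hle⟩
    obtain ⟨j, hj, rfl⟩ := List.mem_iff_getElem.mp hmem
    have hj' : c + 1 + j < xs.length := by simp [List.length_drop] at hj; omega
    refine ⟨(c : Int) + 1 + j, ⟨by omega, by omega⟩, ?_⟩
    rw [PySem.List.pyGetD_eq_getElem xs 0 (by omega) (by omega)]
    have he : (((c : Int) + 1 + j)).toNat = c + 1 + j := by omega
    simpa [he, List.getElem_drop] using hle

-- B's side test through the characterisation: existence over take/drop
lemma blocked_sideMaxes_fst (seq : List Int) (k hh : Int) :
    ((pvSideMaxes seq k).1.elim false (fun x => decide (hh ≤ x)))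
      = ((seq.take k.toNat).any (fun t => decide (hh ≤ t))) := by
  rw [sideMaxes_eq, elim_foldl_omax]
  simp

lemma blocked_sideMaxes_snd (seq : List Int) (k hh : Int) :
    ((pvSideMaxes seq k).2.elim false (fun x => decide (hh ≤ x)))
      = ((seq.drop (k + 1).toNat).any (fun t => decide (hh ≤ t))) := by
  rw [sideMaxes_eq, elim_foldl_omax]
  simp

-- ===== VERDICT (by name: the statement is the Claim_ definition above) =====
theorem check_trees_blocked_spec : Claim_equal_check_trees_blocked := by
  intro idx_row idx_col tree_list _ hpre
  obtain ⟨hcols, hr0, hrlt⟩ := hpre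
  unfold Spec_check_trees_blocked check_trees_blocked check_trees_blocked_alt
  simp only []
  by_cases hcneg : idx_col < 0
  · -- idx_col negative: A's left range() is empty and B's before-bucket is empty; both sides False
    rw [PySem.List.pyRange_neg_one_eq_nil (by omega), blocked_sideMaxes_fst]
    have : idx_col.toNat = 0 := by omega
    simp [this]
  by_cases hrneg : idx_row < 0
  · -- idx_row negative: A's upward range() is empty and B's before-bucket over the column is empty
    rw [PySem.List.pyRange_neg_one_eq_nil (show idx_row - 1 ≤ -1 by omega)]
    rw [blocked_sideMaxes_fst (k := idx_row)]
    have : idx_row.toNat = 0 := by omega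
    simp [this]
  -- main case: 0 ≤ idx_row < len, 0 ≤ idx_col < every row length
  obtain ⟨r, rfl⟩ : ∃ r : Nat, idx_row = (r : Int) := ⟨idx_row.toNat, by omega⟩
  obtain ⟨c, rfl⟩ : ∃ c : Nat, idx_col = (c : Int) := ⟨idx_col.toNat, by omega⟩
  set row := PySem.List.pyGetD tree_list (r : Int) [] with hrowdef
  have hrowmem : row ∈ tree_list :=
    PySem.List.pyGetD_mem tree_list [] ⟨by omega, by omega⟩
  have hclen : (c : Int) < (row.length : Int) := (hcols _ hrowmem).2
  have hrlt' : r < tree_list.length := by exact_mod_cast hrlt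
  have hclen' : c < row.length := by exact_mod_cast hclen
  set col := tree_list.map (fun rw => PySem.List.pyGetD rw (c : Int) 0) with hcoldef
  have hcollen : col.length = tree_list.length := by simp [hcoldef]
  set h := PySem.List.pyGetD row (c : Int) 0 with hdef
  rw [blocked_sideMaxes_fst, blocked_sideMaxes_snd, blocked_sideMaxes_fst, blocked_sideMaxes_snd]
  rw [show ((c : Int)).toNat = c by omega, show ((r : Int)).toNat = r by omega,
      show ((c : Int) + 1).toNat = c + 1 by omega, show ((r : Int) + 1).toNat = r + 1 by omega]
  rw [any_countdown_eq_any_take row h c (by omega), any_countup_eq_any_drop row h c]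
  -- the two vertical directions: A reads tree_list[idx][idx_col] where B reads col[idx]
  have hcong : ∀ idx : Int, 0 ≤ idx → idx < (tree_list.length : Int) →
      PySem.List.pyGetD (PySem.List.pyGetD tree_list idx []) (c : Int) 0
        = PySem.List.pyGetD col idx 0 := by
    intro idx h0 hlt
    rw [PySem.List.pyGetD_eq_getElem tree_list [] h0 hlt,
        PySem.List.pyGetD_eq_getElem col 0 h0 (by omega)]
    simp [hcoldef]
  have hup : ((PySem.List.pyRange ((r : Int) - 1) (-1) (-1)).any
        (fun idx => decide (h ≤ PySem.List.pyGetD (PySem.List.pyGetD tree_list idx []) (c : Int) 0)))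
      = ((PySem.List.pyRange ((r : Int) - 1) (-1) (-1)).any
        (fun idx => decide (h ≤ PySem.List.pyGetD col idx 0))) := by
    apply PySem.List.any_congr_mem
    intro idx hmem
    rw [PySem.List.pyRange_neg_one] at hmem
    simp only [List.mem_map, List.mem_range] at hmem
    obtain ⟨k, hk, rfl⟩ := hmem
    rw [hcong _ (by omega) (by omega)]
  have hdown : ((PySem.List.pyRange ((r : Int) + 1) (tree_list.length : Int) 1).any
        (fun idx => decide (h ≤ PySem.List.pyGetD (PySem.List.pyGetD tree_list idx []) (c : Int) 0)))
      = ((PySem.List.pyRange ((r : Int) + 1) (tree_list.length : Int) 1).any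
        (fun idx => decide (h ≤ PySem.List.pyGetD col idx 0))) := by
    apply PySem.List.any_congr_mem
    intro idx hmem
    rw [PySem.List.mem_pyRange_one] at hmem
    rw [hcong _ (by omega) (by omega)]
  rw [hup, hdown]
  rw [any_countdown_eq_any_take col h r (by omega)]
  rw [show (tree_list.length : Int) = (col.length : Int) by rw [hcollen],
      any_countup_eq_any_drop col h r]
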